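-- pv_equiv track=rewrite | github.com/mvidner/agama-release-checker | src/agama_release_checker/parsing.py | parse_obsinfo
-- ===== SOURCE A (Python) =====
-- from typing import Optional, Tuple
--
-- def parse_obsinfo(content: str) -> Optional[str]:
--     """Parses simple key: value format from .obsinfo file."""
--     for line in content.splitlines():
--         if ":" in line:
--             parts = line.split(":", 1)
--             if len(parts) == 2:
--                 key, value = parts
--                 if key.strip() == "version":
--                     return value.strip()
--     return None
-- ===== SOURCE B (Python) =====
-- def parse_obsinfo(content):
--     """Parses simple key: value format from .obsinfo file."""
--     table = {}
--     for line in content.splitlines():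
--         if ":" in line:
--             key, value = line.split(":", 1)
--             table.setdefault(key.strip(), value.strip())
--     return table.get("version")
-- ===== Notes on version B (the rewrite author's own statement) =====
-- stated objective: alternative
-- what changed: Replaces the early-return targeted scan with a build-table-then-lookup decomposition: every line is parsed into a first-wins dict (setdefault) and the answer is a single dict.get('version') afterwards.
import Mathlib
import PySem

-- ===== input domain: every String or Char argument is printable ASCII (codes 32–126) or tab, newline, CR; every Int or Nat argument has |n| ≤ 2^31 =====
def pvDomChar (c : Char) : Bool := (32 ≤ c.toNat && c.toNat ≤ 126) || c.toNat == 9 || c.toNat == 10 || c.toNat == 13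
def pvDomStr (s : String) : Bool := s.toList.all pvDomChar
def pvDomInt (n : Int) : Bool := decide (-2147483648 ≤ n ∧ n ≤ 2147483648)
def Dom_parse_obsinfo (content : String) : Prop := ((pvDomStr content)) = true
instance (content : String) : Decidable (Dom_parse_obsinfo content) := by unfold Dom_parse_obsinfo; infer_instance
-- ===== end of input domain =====

-- B replaces A's early-return scan by building a first-wins key→value table and one lookup; same cost, different decomposition.

-- ===== PORT A =====
-- A's loop over splitlines with early return on the first 'version' key
def pvScanA : List String → Option String
  | [] => none
  | line :: rest =>
    if PySem.Str.isIn ":" line then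
      match PySem.Str.splitMax? line ":" 1 with
      | some [key, value] =>
        if PySem.Str.strip key == "version" then some (PySem.Str.strip value)
        else pvScanA rest
      | _ => pvScanA rest
    else pvScanA rest

def parse_obsinfo (content : String) : Option String :=
  pvScanA (PySem.Str.splitlines content)

-- ===== PORT B =====
-- one step of B's table-building loop: first occurrence of a key wins (setdefault)
def pvStepB (d : PySem.Dict String String) (line : String) : PySem.Dict String String :=
  if PySem.Str.isIn ":" line then
    match PySem.Str.splitMax? line ":" 1 with
    | some [key, value] => d.setdefault (PySem.Str.strip key) (PySem.Str.strip value)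
    | _ => d
  else d

def parse_obsinfo_alt (content : String) : Option String :=
  ((PySem.Str.splitlines content).foldl pvStepB PySem.Dict.empty).get? "version"

-- ===== PRECONDITION & SPEC =====
def Spec_parse_obsinfo (content : String) (out : Option String) : Prop := out = parse_obsinfo_alt content
instance (content : String) (out : Option String) : Decidable (Spec_parse_obsinfo content out) := by unfold Spec_parse_obsinfo; infer_instance

-- ===== CLAIM (what is proved, stated in full; the proofs are below) =====
def Claim_equal_parse_obsinfo : Prop := ∀ (content : String), Dom_parse_obsinfo content → Spec_parse_obsinfo content (parse_obsinfo content)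

-- ===== LEMMAS AND PROOFS =====

-- B's table lookup is 'what the accumulator already holds, else A's scan of the remaining lines'
lemma pv_fold_get (lines : List String) : ∀ (d : PySem.Dict String String),
    (lines.foldl pvStepB d).get? "version" = (d.get? "version").or (pvScanA lines) := by
  induction lines with
  | nil => intro d; simp [pvScanA]
  | cons line rest ih =>
    intro d
    simp only [List.foldl_cons, pvScanA, pvStepB]
    by_cases hin : PySem.Str.isIn ":" line = true
    · simp only [hin, if_true]
      cases hm : PySem.Str.splitMax? line ":" 1 with
      | none => exact ih d
      | some parts =>
        match parts with
        | [] => exact ih d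
        | [k] => exact ih d
        | k :: v :: w :: t => exact ih d
        | [k, v] =>
          by_cases hk : PySem.Str.strip k = "version"
          · simp only [hk, beq_self_eq_true, if_true]
            rw [ih, PySem.Dict.get?_setdefault_self]
            cases d.get? "version" <;> simp
          · have hkb : (PySem.Str.strip k == "version") = false := beq_eq_false_iff_ne.mpr hk
            simp only [hkb, Bool.false_eq_true, if_false]
            rw [ih, PySem.Dict.get?_setdefault_of_ne _ _ (fun h => hk h.symm)]
    · simp only [hin, Bool.false_eq_true, if_false]
      exact ih d

-- ===== VERDICT (by name: the statement is the Claim_ definition above) =====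
theorem parse_obsinfo_spec : Claim_equal_parse_obsinfo := by
  intro content _
  unfold Spec_parse_obsinfo parse_obsinfo parse_obsinfo_alt
  rw [pv_fold_get]
  rfl
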